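-- pv_equiv track=rewrite | github.com/magladde/Code-Wars | python/6-kyu/difference-of-2.py | twos_difference
-- ===== SOURCE A (Python) =====
-- def twos_difference(lst):
--     lst = sorted(lst)
--     solutions = []
--     for i in lst:
--         for j in lst:
--             if i - j == 2:
--                 solutions.append((min([i,j]), max([i, j])))
--     return solutions
-- ===== SOURCE B (Python) =====
-- def twos_difference(lst):
--     counts = {}
--     for x in lst:
--         counts[x] = counts.get(x, 0) + 1
--     out = []
--     for v in sorted(counts):
--         out += [(v - 2, v)] * (counts.get(v - 2, 0) * counts[v])
--     return out
-- ===== Notes on version B (the rewrite author's own statement) =====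
-- stated objective: faster
-- what changed: Replaced the O(n^2) double scan of the sorted list by a counting dict plus one pass over the sorted distinct values, emitting (v-2,v) count(v-2)*count(v) times.
import Mathlib
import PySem

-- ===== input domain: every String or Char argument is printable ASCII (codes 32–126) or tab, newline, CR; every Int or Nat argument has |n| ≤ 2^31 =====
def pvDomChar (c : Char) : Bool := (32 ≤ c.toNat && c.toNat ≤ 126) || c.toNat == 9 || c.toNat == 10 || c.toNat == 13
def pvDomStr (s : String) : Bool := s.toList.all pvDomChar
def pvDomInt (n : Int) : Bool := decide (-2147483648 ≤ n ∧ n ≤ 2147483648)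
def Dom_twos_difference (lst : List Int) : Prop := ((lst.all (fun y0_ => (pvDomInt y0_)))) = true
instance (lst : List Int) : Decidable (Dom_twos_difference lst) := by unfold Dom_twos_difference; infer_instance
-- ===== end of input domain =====

-- B replaces A's quadratic double scan of the sorted list by a counting dict and one
-- pass over the sorted distinct values (objective: faster).

-- ===== PORT A =====
-- for i in sorted(lst): for j in sorted(lst): if i - j == 2: solutions.append((min([i,j]), max([i,j])))
def twos_difference (lst : List Int) : List (Int × Int) :=
  let s := PySem.List.sorted lst (fun v => v) false
  s.foldl (fun sol i =>
    s.foldl (fun sol2 j =>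
      if i - j == 2 then sol2 ++ [(min i j, max i j)] else sol2) sol) []

-- ===== PORT B =====
-- counts = {}; for x in lst: counts[x] = counts.get(x, 0) + 1
-- out = []; for v in sorted(counts): out += [(v-2, v)] * (counts.get(v-2, 0) * counts[v]); return out
-- (counts[v] is ported as getD v 0: v is a key of counts, so no KeyError is possible)
def twos_difference_alt (lst : List Int) : List (Int × Int) :=
  let counts : PySem.Dict Int Int :=
    lst.foldl (fun d x => d.insert x (d.getD x 0 + 1)) PySem.Dict.empty
  (PySem.List.sorted counts.keys (fun v => v) false).foldl
    (fun out v =>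
      out ++ PySem.List.pyRepeat [(v - 2, v)] (counts.getD (v - 2) 0 * counts.getD v 0)) []

-- ===== PRECONDITION & SPEC =====
def Spec_twos_difference (lst : List Int) (out : List (Int × Int)) : Prop := out = twos_difference_alt lst
instance (lst : List Int) (out : List (Int × Int)) : Decidable (Spec_twos_difference lst out) := by unfold Spec_twos_difference; infer_instance

-- ===== CLAIM (what is proved, stated in full; the proofs are below) =====
def Claim_equal_twos_difference : Prop := ∀ (lst : List Int), Dom_twos_difference lst → Spec_twos_difference lst (twos_difference lst)

-- ===== LEMMAS AND PROOFS =====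

-- PySem.Set.discard is the filter removing every occurrence of x
theorem pv_discard_eq_filter (s : List Int) (x : Int) :
    PySem.Set.discard s x = s.filter (fun y => y != x) := rfl

theorem pv_discard_of_not_mem (s : List Int) (x : Int) (h : x ∉ s) :
    PySem.Set.discard s x = s := by
  rw [pv_discard_eq_filter]
  exact List.filter_eq_self.2 (fun y hy => by simp; rintro rfl; exact h hy)

theorem pv_ofList_sublist (xs : List Int) : (PySem.Set.ofList xs).Sublist xs := by
  induction xs with
  | nil => simp [PySem.Set.ofList_nil]
  | cons x t ih =>
    rw [PySem.Set.ofList_cons, pv_discard_eq_filter]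
    exact (List.filter_sublist.trans ih).cons₂ x

-- grouping: flatMap over a ≤-sorted list equals flatMap over its dedup with each
-- value's block repeated (count) times
theorem pv_flatMap_grouped {α : Type} (g : Int → List α) :
    ∀ (s : List Int), s.Pairwise (· ≤ ·) →
      s.flatMap g
        = (PySem.List.dedup s).flatMap (fun v => (List.replicate (s.count v) (g v)).flatten) := by
  intro s
  induction s with
  | nil => intro _; simp
  | cons x t ih =>
    intro hp
    rw [List.pairwise_cons] at hp
    obtain ⟨hx, ht⟩ := hp
    have hded : PySem.List.dedup (x :: t) = x :: PySem.Set.discard (PySem.List.dedup t) x := by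
      simp [PySem.Set.ofList_cons]
    rw [List.flatMap_cons, hded, List.flatMap_cons, ih ht]
    have hcx : (x :: t).count x = t.count x + 1 := by simp
    have hcongr : (PySem.Set.discard (PySem.List.dedup t) x).flatMap
          (fun v => (List.replicate ((x :: t).count v) (g v)).flatten)
        = (PySem.Set.discard (PySem.List.dedup t) x).flatMap
          (fun v => (List.replicate (t.count v) (g v)).flatten) := by
      apply List.flatMap_congr
      intro v hv
      have hvx : v ≠ x := by
        rw [pv_discard_eq_filter] at hv
        have := List.of_mem_filter hv; simpa using this
      simp [Ne.symm hvx]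
    rw [hcongr, hcx, List.replicate_succ, List.flatten_cons]
    by_cases hmem : x ∈ t
    · -- all copies of x sit at the front of t: its head is x
      obtain ⟨h, t', rfl⟩ : ∃ h t', t = h :: t' := by
        cases t with
        | nil => simp at hmem
        | cons a b => exact ⟨a, b, rfl⟩
      have hhx : h = x := by
        have h1 : x ≤ h := hx h (by simp)
        have h2 : h ≤ x := by
          rcases List.mem_cons.mp hmem with rfl | hmx
          · rfl
          · exact (List.pairwise_cons.mp ht).1 x hmx
        omega
      subst hhx
      have hdt : PySem.List.dedup (h :: t') = h :: PySem.Set.discard (PySem.List.dedup t') h := by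
        simp [PySem.Set.ofList_cons]
      have hdisc : PySem.Set.discard (PySem.List.dedup (h :: t')) h
          = PySem.Set.discard (PySem.List.dedup t') h := by
        rw [hdt, pv_discard_eq_filter, List.filter_cons]
        simp [pv_discard_eq_filter, List.filter_filter]
      rw [hdisc, hdt, List.flatMap_cons]
      simp [List.append_assoc]
    · have h0 : t.count x = 0 := List.count_eq_zero.mpr hmem
      have hnd : x ∉ PySem.List.dedup t := by rw [PySem.List.mem_dedup]; exact hmem
      rw [pv_discard_of_not_mem _ _ hnd, h0]
      simp

-- A's nested loops, as a flatMap over the sorted list: each i contributes one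
-- (i-2, i) per occurrence of i-2
theorem pv_A_flatMap (lst : List Int) :
    twos_difference lst
      = (PySem.List.sorted lst (fun v => v) false).flatMap
          (fun i => List.replicate ((PySem.List.sorted lst (fun v => v) false).count (i - 2)) (i - 2, i)) := by
  unfold twos_difference
  set s := PySem.List.sorted lst (fun v => v) false with hs
  show s.foldl _ [] = _
  have h1 := PySem.List.foldl_congr_mem (l := s)
    (fun sol i =>
       s.foldl (fun sol2 j =>
         if i - j == 2 then sol2 ++ [(min i j, max i j)] else sol2) sol)
    (fun sol i => sol ++ (s.filter (fun j => i - j == 2)).map (fun j => (min i j, max i j)))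
    [] (by intro acc x hx; dsimp only; rw [PySem.List.foldl_append_if])
  rw [h1, PySem.List.foldl_append_eq_flatMap, List.nil_append]
  apply List.flatMap_congr
  intro i hi
  rw [List.filter_congr (q := (· == i - 2)) (by intro j hj; simp; omega), List.filter_beq,
      List.map_replicate]
  congr 1
  rw [min_eq_right (by omega), max_eq_left (by omega)]

-- B's loop, as a flatMap over the sorted distinct values
theorem pv_B_flatMap (lst : List Int) :
    twos_difference_alt lst
      = (PySem.List.sorted (PySem.Set.ofList lst) (fun v => v) false).flatMap
          (fun v => List.replicate (lst.count (v - 2) * lst.count v) (v - 2, v)) := by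
  unfold twos_difference_alt
  have hc : lst.foldl (fun d x => d.insert x (d.getD x 0 + 1)) PySem.Dict.empty
      = PySem.Dict.counter lst := PySem.Dict.foldl_insert_getD_add_one_eq_counter lst
  dsimp only
  rw [hc, PySem.Dict.keys_counter, PySem.List.foldl_append_eq_flatMap, List.nil_append]
  apply List.flatMap_congr
  intro v hv
  rw [PySem.Dict.getD_counter, PySem.Dict.getD_counter, PySem.List.pyRepeat_singleton]
  rw [← Nat.cast_mul, Int.toNat_natCast, Nat.mul_comm]

-- sorted(set(lst)) is the first-occurrence dedup of sorted(lst)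
theorem pv_dedup_sorted (lst : List Int) :
    PySem.List.sorted (PySem.Set.ofList lst) (fun v => v) false
      = PySem.List.dedup (PySem.List.sorted lst (fun v => v) false) := by
  set s := PySem.List.sorted lst (fun v => v) false with hs
  apply PySem.List.sorted_eq_of_perm_of_pairwise_lt
  · rw [List.perm_ext_iff_of_nodup (PySem.List.nodup_dedup s) (PySem.Set.nodup_ofList lst)]
    intro a
    rw [PySem.List.mem_dedup, PySem.Set.mem_ofList, hs, PySem.List.mem_sorted]
  · have hle : s.Pairwise (fun a b => a ≤ b) := PySem.List.sorted_pairwise lst (fun v => v) ..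
    have hsub : (PySem.List.dedup s).Sublist s := by
      rw [PySem.List.dedup_eq_ofList]; exact pv_ofList_sublist s
    have h1 : (PySem.List.dedup s).Pairwise (fun a b => a ≤ b) := hle.sublist hsub
    have h2 : (PySem.List.dedup s).Pairwise (fun a b => a ≠ b) := PySem.List.nodup_dedup s
    exact (h1.and h2).imp (fun h => lt_of_le_of_ne h.1 h.2)

-- ===== VERDICT (by name: the statement is the Claim_ definition above) =====
theorem twos_difference_spec : Claim_equal_twos_difference := by
  intro lst _
  unfold Spec_twos_difference
  rw [pv_A_flatMap, pv_B_flatMap, pv_dedup_sorted]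
  set s := PySem.List.sorted lst (fun v => v) false with hs
  rw [pv_flatMap_grouped _ s (PySem.List.sorted_pairwise lst (fun v => v) ..)]
  apply List.flatMap_congr
  intro v hv
  rw [List.flatten_replicate_replicate]
  have hcnt : ∀ a : Int, s.count a = lst.count a :=
    fun a => (PySem.List.sorted_perm lst (fun v => v) false).count_eq a
  rw [hcnt, hcnt, Nat.mul_comm]
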